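-- pv_equiv track=rewrite | github.com/upasek/Data-Structures | Array/array_rotations/Maximum_value_AR7.py | sumofarray
-- ===== SOURCE A (Python) =====
-- def sumofarray(arr, size):
-- 	maxval = 0
-- 	sum = 0
-- 	for i in range(size):
-- 		if arr[i] > maxval:
-- 			maxval = arr[i]
-- 			index = i
--
-- 	back = index
-- 	mul = size-1
-- 	for j in range(index, -1, -1):
-- 		sum = sum + (mul*arr[back])
-- 		mul -= 1
-- 		back -= 1
--
-- 	mul2 = 0
-- 	for k in range(index+1, size):
-- 		sum = sum + (mul2*arr[k])
-- 		mul2 += 1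
--
-- 	return sum, (size-1)-index;
-- ===== SOURCE B (Python) =====
-- def sumofarray(arr, size):
--     # index of the first maximum among arr[0:size] (same winner as A's strict-> scan when the max is positive)
--     index = max(range(size), key=lambda i: arr[i])
--     # single forward pass over the array left-rotated to start right after the max:
--     # element j of that rotation carries weight j
--     total = sum(j * arr[(index + 1 + j) % size] for j in range(size))
--     return total, (size - 1) - index
-- ===== Notes on version B (the rewrite author's own statement) =====
-- stated objective: alternative
-- what changed: B finds the max index with a single max(range(size), key=...) call and replaces A's two directional weighted loops (one counting down from the max index, one counting up after it) by one forward pass over the array rotated to start right after the max, where the weight of element j is simply j.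
import Mathlib
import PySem

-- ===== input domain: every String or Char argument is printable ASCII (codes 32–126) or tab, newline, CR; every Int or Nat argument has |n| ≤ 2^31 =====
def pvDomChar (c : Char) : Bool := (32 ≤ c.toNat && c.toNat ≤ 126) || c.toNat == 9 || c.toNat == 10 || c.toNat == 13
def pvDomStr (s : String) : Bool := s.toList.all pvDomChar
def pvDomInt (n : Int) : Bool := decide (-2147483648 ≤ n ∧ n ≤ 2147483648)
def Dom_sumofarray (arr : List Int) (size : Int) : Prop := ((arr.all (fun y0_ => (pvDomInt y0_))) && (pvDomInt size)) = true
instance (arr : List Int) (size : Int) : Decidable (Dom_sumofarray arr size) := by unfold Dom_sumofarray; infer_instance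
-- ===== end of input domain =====

-- B replaces A's two directional weighted loops by a max(range, key) call plus one forward
-- pass over the rotation starting right after the max (objective: alternative, same cost).

-- ===== PORT A =====
-- arr[i] is ported as pyGetD arr i 0: inside Pre_ every index either loop touches is in range, so this is exact there.
def sumofarray (arr : List Int) (size : Int) : Int × Int :=
  let st := (PySem.List.pyRange 0 size 1).foldl
      (fun (s : Int × Option Int) i =>
        if PySem.List.pyGetD arr i 0 > s.1 then (PySem.List.pyGetD arr i 0, some i) else s)
      (0, none)
  match st.2 with
  | none => (0, 0)   -- Python raises UnboundLocalError here (index never bound); excluded by Pre_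
  | some index =>
      let s1 := (PySem.List.pyRange index (-1) (-1)).foldl
        (fun (t : Int × Int × Int) _j =>
          (t.1 + t.2.1 * PySem.List.pyGetD arr t.2.2 0, t.2.1 - 1, t.2.2 - 1))
        (0, size - 1, index)
      let s2 := (PySem.List.pyRange (index + 1) size 1).foldl
        (fun (t : Int × Int) k =>
          (t.1 + t.2 * PySem.List.pyGetD arr k 0, t.2 + 1))
        (s1.1, 0)
      (s2.1, (size - 1) - index)

-- ===== PORT B =====
def sumofarray_alt (arr : List Int) (size : Int) : Int × Int :=
  match PySem.List.max? (PySem.List.pyRange 0 size 1) (fun i => PySem.List.pyGetD arr i 0) with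
  | none => (0, 0)   -- Python raises ValueError here (max of an empty range); excluded by Pre_
  | some index =>
      let total := ((PySem.List.pyRange 0 size 1).map
        (fun j => j * PySem.List.pyGetD arr (PySem.Int.mod (index + 1 + j) size) 0)).sum
      (total, (size - 1) - index)

-- ===== PRECONDITION & SPEC =====
-- Pre_ excludes exactly the inputs where the Python A raises: size > len(arr) (IndexError),
-- size ≤ 0 or a scanned prefix with no positive element (UnboundLocalError: index never bound).
def Pre_sumofarray (arr : List Int) (size : Int) : Prop :=
  0 < size ∧ size ≤ arr.length ∧ (arr.take size.toNat).any (fun x => decide (0 < x)) = true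
instance (arr : List Int) (size : Int) : Decidable (Pre_sumofarray arr size) := by
  unfold Pre_sumofarray; infer_instance
def pvWitness_sumofarray : List Int × Int := ([1, 2, 3], 3)

def Spec_sumofarray (arr : List Int) (size : Int) (out : Int × Int) : Prop := out = sumofarray_alt arr size
instance (arr : List Int) (size : Int) (out : Int × Int) : Decidable (Spec_sumofarray arr size out) := by unfold Spec_sumofarray; infer_instance

-- ===== CLAIM (what is proved, stated in full; the proofs are below) =====
def Claim_equal_sumofarray : Prop := ∀ (arr : List Int) (size : Int), Dom_sumofarray arr size → Pre_sumofarray arr size → Spec_sumofarray arr size (sumofarray arr size)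

-- ===== LEMMAS AND PROOFS =====

lemma pv_up_sum (K : Int → Int) : ∀ (n : Nat) (a s m : Int),
    ((PySem.List.pyRange a (a + n) 1).foldl
        (fun (t : Int × Int) k => (t.1 + t.2 * K k, t.2 + 1)) (s, m)).1
      = s + ((List.range n).map (fun t : Nat => (m + (t : Int)) * K (a + (t : Int)))).sum := by
  intro n
  induction n with
  | zero =>
    intro a s m
    rw [show a + ((0:Nat):Int) = a from by push_cast; ring, PySem.List.pyRange_one_eq_nil le_rfl]
    simp
  | succ n ih =>
    intro a s m
    rw [PySem.List.pyRange_one_cons (by push_cast; omega)]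
    simp only [List.foldl_cons]
    rw [show a + ((n+1 : Nat):Int) = (a+1) + (n : Int) from by push_cast; ring]
    rw [ih (a+1) (s + m * K a) (m+1)]
    rw [List.range_succ_eq_map]
    simp only [List.map_cons, List.map_map, List.sum_cons, Function.comp_def]
    have : ∀ t ∈ List.range n, (m + 1 + (t:Int)) * K (a + 1 + t)
        = (m + ((t.succ : Nat):Int)) * K (a + ((t.succ : Nat):Int)) := by
      intro t _
      have h1 : a + 1 + (t:Int) = a + ((t.succ : Nat):Int) := by push_cast; ring
      have h2 : m + 1 + (t:Int) = m + ((t.succ : Nat):Int) := by push_cast; ring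
      rw [h1, h2]
    rw [List.map_congr_left this]
    simp only [Nat.cast_zero, add_zero]
    ring

lemma pv_down_sum (K : Int → Int) : ∀ (n : Nat) (s m b : Int),
    ((PySem.List.pyRange ((n : Int) - 1) (-1) (-1)).foldl
        (fun (t : Int × Int × Int) _j => (t.1 + t.2.1 * K t.2.2, t.2.1 - 1, t.2.2 - 1)) (s, m, b)).1
      = s + ((List.range n).map (fun t : Nat => (m - (t : Int)) * K (b - (t : Int)))).sum := by
  intro n
  induction n with
  | zero =>
    intro s m b
    rw [PySem.List.pyRange_neg_one_eq_nil (by omega)]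
    simp
  | succ n ih =>
    intro s m b
    rw [PySem.List.pyRange_neg_one_cons (by push_cast; omega)]
    simp only [List.foldl_cons]
    rw [show ((n+1 : Nat):Int) - 1 - 1 = (n : Int) - 1 from by push_cast; ring]
    rw [ih (s + m * K b) (m-1) (b-1)]
    rw [List.range_succ_eq_map]
    simp only [List.map_cons, List.map_map, List.sum_cons, Function.comp_def]
    have : ∀ t ∈ List.range n, (m - 1 - (t:Int)) * K (b - 1 - t)
        = (m - ((t.succ : Nat):Int)) * K (b - ((t.succ : Nat):Int)) := by
      intro t _
      have h1 : b - 1 - (t:Int) = b - ((t.succ : Nat):Int) := by push_cast; ring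
      have h2 : m - 1 - (t:Int) = m - ((t.succ : Nat):Int) := by push_cast; ring
      rw [h1, h2]
    rw [List.map_congr_left this]
    simp only [Nat.cast_zero, sub_zero]
    ring

def pvStepB (key : Int → Int) (acc : Option Int) (z : Int) : Option Int :=
  match acc with
  | none => some z
  | some m => if key m < key z then some z else some m

lemma pv_max_eq_foldl (key : Int → Int) (l : List Int) :
    PySem.List.max? l key = l.foldl (pvStepB key) none := by
  unfold PySem.List.max?
  congr 1
  funext acc z
  cases acc <;> rfl

lemma pv_sync (key : Int → Int) : ∀ (l : List Int) (b : Int),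
    ∃ c, (l.foldl (pvStepB key) (some b)) = some c ∧
      l.foldl (fun (s : Int × Option Int) i => if key i > s.1 then (key i, some i) else s)
          (key b, some b) = (key c, some c) := by
  intro l
  induction l with
  | nil => exact fun b => ⟨b, rfl, rfl⟩
  | cons x l ih =>
    intro b
    by_cases h : key b < key x
    · simpa [List.foldl_cons, pvStepB, h, gt_iff_lt] using ih x
    · simpa [List.foldl_cons, pvStepB, h, gt_iff_lt] using ih b

lemma pv_skipA (key : Int → Int) : ∀ (l1 t : List Int), (∀ y ∈ l1, key y ≤ 0) →
    (l1 ++ t).foldl (fun (s : Int × Option Int) i => if key i > s.1 then (key i, some i) else s)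
        (0, none)
      = t.foldl (fun (s : Int × Option Int) i => if key i > s.1 then (key i, some i) else s)
        (0, none) := by
  intro l1
  induction l1 with
  | nil => simp
  | cons y l1 ih =>
    intro t h
    have hy : ¬ (key y > (0 : Int)) := by
      have := h y (by simp); omega
    simp only [List.cons_append, List.foldl_cons, hy]
    exact ih t (fun z hz => h z (by simp [hz]))

lemma pv_skipB (key : Int → Int) (x : Int) : ∀ (l1 : List Int) (ob : Option Int),
    (∀ y ∈ l1, key y < key x) → (∀ y, ob = some y → key y < key x) → ∀ (l2 : List Int),
    (l1 ++ x :: l2).foldl (pvStepB key) ob = l2.foldl (pvStepB key) (some x) := by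
  intro l1
  induction l1 with
  | nil =>
    intro ob _ hob l2
    cases ob with
    | none => rfl
    | some y => simp [List.foldl_cons, pvStepB, hob y rfl]
  | cons z l1 ih =>
    intro ob h hob l2
    have hz : key z < key x := h z (by simp)
    simp only [List.cons_append, List.foldl_cons]
    cases ob with
    | none => exact ih (some z) (fun y hy => h y (by simp [hy])) (by rintro y ⟨rfl⟩; exact hz) l2
    | some y =>
      by_cases hyz : key y < key z
      · simp only [pvStepB, if_pos hyz]
        exact ih (some z) (fun y hy => h y (by simp [hy])) (by rintro y ⟨rfl⟩; exact hz) l2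
      · simp only [pvStepB, if_neg hyz]
        exact ih (some y) (fun y hy => h y (by simp [hy])) (by rintro w ⟨rfl⟩; exact hob y rfl) l2

lemma pv_index_eq (arr : List Int) (size : Int) (h : Pre_sumofarray arr size) :
    ∃ c : Int, 0 ≤ c ∧ c < size ∧
      ((PySem.List.pyRange 0 size 1).foldl
        (fun (s : Int × Option Int) i =>
          if PySem.List.pyGetD arr i 0 > s.1 then (PySem.List.pyGetD arr i 0, some i) else s)
        (0, none)).2 = some c ∧
      PySem.List.max? (PySem.List.pyRange 0 size 1) (fun i => PySem.List.pyGetD arr i 0) = some c := by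
  obtain ⟨hs, hlen, hany⟩ := h
  set key : Int → Int := fun i => PySem.List.pyGetD arr i 0 with hkeydef
  set p : Int → Bool := fun i => decide (key i ≤ 0) with hpdef
  set l : List Int := PySem.List.pyRange 0 size 1 with hldef
  have hex : ∃ x ∈ l, 0 < key x := by
    simp only [List.any_eq_true, decide_eq_true_eq] at hany
    obtain ⟨v, hv, hvpos⟩ := hany
    obtain ⟨j, hj, rfl⟩ := List.mem_iff_getElem.mp hv
    have hjlt : j < size.toNat := by
      have := hj; simp [List.length_take] at this; omega
    refine ⟨(j : Int), ?_, ?_⟩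
    · rw [hldef, PySem.List.mem_pyRange_one]
      constructor
      · positivity
      · omega
    · simp only [hkeydef]
      rw [PySem.List.pyGetD_natCast]
      have hjl : j < arr.length := by omega
      rw [List.getElem_take] at *
      rw [List.getD_eq_getElem arr 0 hjl]
      exact hvpos
  -- decompose the range at its first element with positive key
  have hdecomp : l.takeWhile p ++ l.dropWhile p = l := List.takeWhile_append_dropWhile
  have hne : l.dropWhile p ≠ [] := by
    intro hnil
    obtain ⟨x, hx, hpos⟩ := hex
    rw [hnil, List.append_nil] at hdecomp
    have := List.mem_takeWhile_imp (l := l) (p := p) (by rw [hdecomp]; exact hx)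
    simp only [hpdef, decide_eq_true_eq] at this
    omega
  obtain ⟨x0, l2, hld⟩ := List.exists_cons_of_ne_nil hne
  have hx0 : 0 < key x0 := by
    have h1 := List.head_dropWhile_not p hne
    have h2 : (l.dropWhile p).head hne = x0 := by simp [hld]
    rw [h2, hpdef] at h1
    simp at h1
    omega
  have htk : ∀ y ∈ l.takeWhile p, key y ≤ 0 := by
    intro y hy
    have := List.mem_takeWhile_imp hy
    simpa [hpdef] using this
  -- A side
  have hAstep : (List.foldl (fun (s : Int × Option Int) i =>
        if key i > s.1 then (key i, some i) else s) (0, none) l)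
      = List.foldl (fun (s : Int × Option Int) i =>
        if key i > s.1 then (key i, some i) else s) (key x0, some x0) l2 := by
    conv_lhs => rw [← hdecomp, hld]
    rw [pv_skipA key _ _ htk]
    simp only [List.foldl_cons, gt_iff_lt, if_pos hx0]
  obtain ⟨c, hBc, hAc⟩ := pv_sync key l2 x0
  -- B side
  have hBfull : PySem.List.max? l key = some c := by
    rw [pv_max_eq_foldl]
    conv_lhs => rw [← hdecomp, hld]
    rw [pv_skipB key x0 _ none (fun y hy => lt_of_le_of_lt (htk y hy) hx0) (by simp) l2]
    exact hBc
  have hcl : c ∈ l := PySem.List.max?_mem hBfull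
  rw [hldef, PySem.List.mem_pyRange_one] at hcl
  exact ⟨c, hcl.1, hcl.2, by rw [hAstep, hAc], hBfull⟩

lemma pv_sum_eq (arr : List Int) (size c : Int) (hc0 : 0 ≤ c) (hcs : c < size) :
    (((PySem.List.pyRange (c + 1) size 1).foldl
        (fun (t : Int × Int) k => (t.1 + t.2 * PySem.List.pyGetD arr k 0, t.2 + 1))
        ((((PySem.List.pyRange c (-1) (-1)).foldl
          (fun (t : Int × Int × Int) _j =>
            (t.1 + t.2.1 * PySem.List.pyGetD arr t.2.2 0, t.2.1 - 1, t.2.2 - 1))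
          (0, size - 1, c)).1), 0)).1)
      = ((PySem.List.pyRange 0 size 1).map
          (fun j => j * PySem.List.pyGetD arr (PySem.Int.mod (c + 1 + j) size) 0)).sum := by
  set K : Int → Int := fun i => PySem.List.pyGetD arr i 0 with hK
  set n2 : Nat := (c + 1).toNat with hn2def
  set n1 : Nat := (size - 1 - c).toNat with hn1def
  have hn2 : ((n2 : Nat) : Int) = c + 1 := by omega
  have hn1 : ((n1 : Nat) : Int) = size - 1 - c := by omega
  -- A's countdown loop
  have hdown := pv_down_sum K n2 0 (size - 1) c
  rw [show ((n2 : Nat) : Int) - 1 = c from by omega] at hdown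
  -- A's forward loop
  have hup := pv_up_sum K n1 (c + 1)
    (((PySem.List.pyRange c (-1) (-1)).foldl
          (fun (t : Int × Int × Int) _j => (t.1 + t.2.1 * K t.2.2, t.2.1 - 1, t.2.2 - 1))
          (0, size - 1, c)).1) 0
  rw [show (c + 1) + ((n1 : Nat) : Int) = size from by omega] at hup
  rw [hup, hdown]
  -- B's single pass, split at n1
  rw [PySem.List.pyRange_one]
  rw [show ((size - 0).toNat) = n1 + n2 from by omega]
  rw [List.range_add, List.map_append, List.map_append, List.sum_append, List.map_map, List.map_map,
    List.map_map]
  simp only [Function.comp_def, zero_add]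
  have hp1 : ∀ x ∈ List.range n1, (x : Int) * PySem.List.pyGetD arr (PySem.Int.mod (c + 1 + (x : Int)) size) 0
      = (x : Int) * K (c + 1 + (x : Int)) := by
    intro x hx
    simp only [List.mem_range] at hx
    have hm : PySem.Int.mod (c + 1 + (x : Int)) size = c + 1 + (x : Int) := by
      rw [PySem.Int.mod_eq_emod_of_pos (by omega)]
      exact Int.emod_eq_of_lt (by omega) (by omega)
    rw [hm, hK]
  have hp2 : ∀ x ∈ List.range n2, ((n1 + x : Nat) : Int) * PySem.List.pyGetD arr (PySem.Int.mod (c + 1 + ((n1 + x : Nat) : Int)) size) 0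
      = (size - 1 - c + (x : Int)) * K ((x : Int)) := by
    intro x hx
    simp only [List.mem_range] at hx
    have harg : c + 1 + ((n1 + x : Nat) : Int) = (x : Int) + size * 1 := by push_cast; omega
    have hm : PySem.Int.mod (c + 1 + ((n1 + x : Nat) : Int)) size = (x : Int) := by
      rw [PySem.Int.mod_eq_emod_of_pos (by omega), harg, Int.add_mul_emod_self_left]
      exact Int.emod_eq_of_lt (by omega) (by omega)
    rw [hm, hK]
    congr 1
    push_cast
    omega
  rw [List.map_congr_left hp1, List.map_congr_left hp2]
  have hrefl : ((List.range n2).map (fun t : Nat => (size - 1 - (t : Int)) * K (c - (t : Int)))).sum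
      = ((List.range n2).map (fun t : Nat => (size - 1 - c + (t : Int)) * K ((t : Int)))).sum := by
    show (∑ j ∈ Finset.range n2, (size - 1 - (j : Int)) * K (c - (j : Int)))
      = ∑ j ∈ Finset.range n2, (size - 1 - c + (j : Int)) * K ((j : Int))
    rw [← Finset.sum_range_reflect (fun j : Nat => (size - 1 - c + (j : Int)) * K ((j : Int))) n2]
    apply Finset.sum_congr rfl
    intro j hj
    simp only [Finset.mem_range] at hj
    have h1 : ((n2 - 1 - j : Nat) : Int) = c - (j : Int) := by omega
    rw [h1]
    congr 1
    omega
  rw [hrefl]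
  exact add_comm _ _


-- ===== VERDICT (by name: the statement is the Claim_ definition above) =====
theorem sumofarray_spec : Claim_equal_sumofarray := by
  intro arr size _hd hpre
  unfold Spec_sumofarray sumofarray sumofarray_alt
  obtain ⟨c, hc0, hcs, hA, hB⟩ := pv_index_eq arr size hpre
  simp only [hA, hB]
  rw [pv_sum_eq arr size c hc0 hcs]
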